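-- pv_equiv track=rewrite | github.com/minacode/panda-parser | supertagging/induction.py | sorted_even_k_split
-- ===== SOURCE A (Python) =====
-- def sorted_even_k_split(elements, k):
--     elements = sorted(elements)
--     div, mod = divmod(len(elements), k)
--     split = []
--     for i in range(k):
--         part = set(elements[i*div:(i+1)*div])
--         split.append(part)
--     if mod:
--         split[-1].update(elements[-mod:])
--     return split
-- ===== SOURCE B (Python) =====
-- def sorted_even_k_split(elements, k):
--     xs = sorted(elements)
--     div = len(xs) // k
--     cut = k * div
--     buckets = [set() for _ in range(k)]
--     for j, x in enumerate(xs):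
--         buckets[j // div if j < cut else k - 1].add(x)
--     return buckets
-- ===== Notes on version B (the rewrite author's own statement) =====
-- stated objective: alternative
-- what changed: Instead of A's k-fold slicing of the sorted list into contiguous blocks plus a post-hoc update of the last set with the remainder tail, B preallocates k empty sets and makes ONE pass over enumerate(sorted list), computing each element's bucket index arithmetically (j//div below the cut k*div, else the last bucket) and scattering it there; no slices and no remainder patch exist in B.
-- outside the precondition, e.g. on sorted_even_k_split([1, 2], -2): A returns [], B raises IndexError
import Mathlib
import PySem

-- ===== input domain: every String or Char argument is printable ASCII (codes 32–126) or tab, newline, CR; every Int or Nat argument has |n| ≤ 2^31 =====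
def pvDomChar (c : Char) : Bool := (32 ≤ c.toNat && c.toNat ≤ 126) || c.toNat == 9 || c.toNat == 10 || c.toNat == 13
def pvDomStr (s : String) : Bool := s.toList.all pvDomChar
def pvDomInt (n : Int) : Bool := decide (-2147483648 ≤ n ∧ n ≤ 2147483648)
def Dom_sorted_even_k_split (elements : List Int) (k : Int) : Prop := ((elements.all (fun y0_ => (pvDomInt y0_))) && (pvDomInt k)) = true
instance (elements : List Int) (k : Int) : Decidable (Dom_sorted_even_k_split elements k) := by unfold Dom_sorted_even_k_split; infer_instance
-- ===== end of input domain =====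

-- B replaces A's slice-per-bucket construction (plus the split[-1].update remainder patch) by one
-- elementwise pass that scatters each sorted element into a preallocated bucket chosen by index
-- arithmetic (objective: alternative; same cost).

-- ===== PORT A =====
def sorted_even_k_split (elements : List Int) (k : Int) : List (List Int) :=
  let es := PySem.List.sorted elements (fun x => x) false
  match PySem.Int.divmod? (es.length : Int) k with
  | none => []            -- k = 0: ZeroDivisionError (excluded by Pre_)
  | some (dv, md) =>
    let split := (PySem.List.pyRange 0 k 1).foldl
      (fun acc i => acc ++ [PySem.Set.ofList (PySem.List.slice es (some (i * dv)) (some ((i + 1) * dv)))]) []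
    if md ≠ 0 then
      if split.isEmpty then []   -- split[-1] on []: IndexError (excluded by Pre_)
      else split.dropLast ++ [PySem.Set.update (split.getLastD []) (PySem.List.slice es (some (-md)) none)]
    else split

-- ===== PORT B =====
-- buckets[i].add(x) is ported as List.modify at the computed index; under Pre_ (k ≥ 1) that index
-- is always nonnegative and in range, where Python list indexing and List.modify agree exactly.
def sorted_even_k_split_alt (elements : List Int) (k : Int) : List (List Int) :=
  let xs := PySem.List.sorted elements (fun x => x) false
  match PySem.Int.floordiv? (xs.length : Int) k with
  | none => []            -- k = 0: ZeroDivisionError (excluded by Pre_)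
  | some dv =>
    let cut := k * dv
    let buckets : List (List Int) := (PySem.List.pyRange 0 k 1).map (fun _ => PySem.Set.empty)
    (PySem.List.enumerate xs).foldl
      (fun bs jx =>
        bs.modify (if jx.1 < cut then PySem.Int.floordiv jx.1 dv else k - 1).toNat
          (fun s => PySem.Set.add s jx.2))
      buckets

-- ===== PRECONDITION & SPEC =====
-- Pre_ excludes k ≤ 0: there A raises ZeroDivisionError (k = 0) or IndexError (k < 0 with a
-- remainder), and in the remaining degenerate corner (k < 0 dividing len(elements)) A's empty
-- result is an accident of the empty range over a nonsensical bucket count (B raises there).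
def Pre_sorted_even_k_split (elements : List Int) (k : Int) : Prop := 1 ≤ k
instance (elements : List Int) (k : Int) : Decidable (Pre_sorted_even_k_split elements k) := by
  unfold Pre_sorted_even_k_split; infer_instance

def pvWitness_sorted_even_k_split : List Int × Int := ([3, 1, 2, 1, 5], 2)

def Spec_sorted_even_k_split (elements : List Int) (k : Int) (out : List (List Int)) : Prop :=
  out = sorted_even_k_split_alt elements k
instance (elements : List Int) (k : Int) (out : List (List Int)) : Decidable (Spec_sorted_even_k_split elements k out) := by
  unfold Spec_sorted_even_k_split; infer_instance

-- ===== CLAIM (what is proved, stated in full; the proofs are below) =====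
def Claim_equal_sorted_even_k_split : Prop := ∀ (elements : List Int) (k : Int), Dom_sorted_even_k_split elements k → Pre_sorted_even_k_split elements k → Spec_sorted_even_k_split elements k (sorted_even_k_split elements k)

-- ===== LEMMAS AND PROOFS =====

-- Bucket i of B's scatter loop: the initial bucket updated with exactly the payloads whose
-- computed index is i, in list order.
lemma pvScatter_getElem? (f : Int × Int → Nat) (l : List (Int × Int)) (bs : List (List Int)) (i : Nat) :
    (l.foldl (fun bs p => bs.modify (f p) (fun s => PySem.Set.add s p.2)) bs)[i]?
      = bs[i]?.map (fun s => PySem.Set.update s ((l.filter (fun p => decide (f p = i))).map (·.2))) := by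
  induction l generalizing bs with
  | nil => cases h : bs[i]? <;> simp [h, PySem.Set.update]
  | cons p l ih =>
      rw [List.foldl_cons, ih, List.getElem?_modify]
      by_cases h : f p = i
      · rw [List.filter_cons_of_pos (by simp [h])]
        cases hb : bs[i]? <;> simp [h, PySem.Set.update]
      · rw [List.filter_cons_of_neg (by simp [h])]
        cases hb : bs[i]? <;> simp [h]

-- Filtering an enumeration by an index interval [a, b) yields the corresponding drop/take segment.
lemma pvFilterEnum (xs : List Int) (s a b : Nat) :
    ((PySem.List.enumerate xs (s : Int)).filter
        (fun p => decide (((a : Nat) : Int) ≤ p.1 ∧ p.1 < ((b : Nat) : Int)))).map (·.2)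
      = (xs.drop (a - s)).take (b - max a s) := by
  induction xs generalizing s with
  | nil => simp [PySem.List.enumerate]
  | cons x t ih =>
      rw [PySem.List.enumerate_cons, show (s : Int) + 1 = ((s + 1 : Nat) : Int) by push_cast; ring]
      rcases Nat.lt_or_ge s a with h | h
      · rw [List.filter_cons_of_neg (by simp; omega), ih]
        rw [show a - s = (a - (s + 1)) + 1 by omega, List.drop_succ_cons,
            show max a s = a by omega, show max a (s + 1) = a by omega]
      · rcases Nat.lt_or_ge s b with h2 | h2
        · rw [List.filter_cons_of_pos (by simp; omega), List.map_cons, ih]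
          rw [show a - s = 0 by omega, show a - (s + 1) = 0 by omega, List.drop_zero, List.drop_zero,
              show max a s = s by omega, show max a (s + 1) = s + 1 by omega,
              show b - s = (b - (s + 1)) + 1 by omega, List.take_succ_cons]
        · rw [List.filter_cons_of_neg (by simp; omega), ih]
          rw [show b - max a s = 0 by omega, show b - max a (s + 1) = 0 by omega,
              List.take_zero, List.take_zero]

-- B's arithmetic bucket index sends j to i exactly when j lies in bucket i's index interval.
lemma pvIdx_iff (K d n : Nat) (hK : 1 ≤ K) (i : Nat) (hiK : i < K) (hcut : K * d ≤ n)
    (j : Int) (hj0 : 0 ≤ j) (hjn : j < (n : Nat)) :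
    ((if j < (K : Int) * (d : Int) then PySem.Int.floordiv j (d : Int) else (K : Int) - 1).toNat = i)
      ↔ (((i * d : Nat) : Int) ≤ j ∧ j < (((if i + 1 = K then n else (i + 1) * d) : Nat) : Int)) := by
  rw [show (K : Int) * (d : Int) = ((K * d : Nat) : Int) by push_cast; ring]
  have hC : ((K * d : Nat) : Int) ≤ (n : Int) := by exact_mod_cast hcut
  have h2 : (((i + 1) * d : Nat) : Int) ≤ ((K * d : Nat) : Int) := by
    exact_mod_cast Nat.mul_le_mul_right d (by omega : i + 1 ≤ K)
  have hA : ((i * d : Nat) : Int) ≤ (((i + 1) * d : Nat) : Int) := by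
    exact_mod_cast Nat.mul_le_mul_right d (by omega : i ≤ i + 1)
  by_cases hd : d = 0
  · subst hd
    simp only [Nat.mul_zero] at *
    rw [if_neg (by omega)]
    by_cases hik : i + 1 = K
    · rw [if_pos hik]
      omega
    · rw [if_neg hik]
      omega
  · have hdpos : (0 : Int) < (d : Int) := by exact_mod_cast Nat.pos_of_ne_zero hd
    by_cases hlt : j < ((K * d : Nat) : Int)
    · rw [if_pos hlt]
      have hq0 : 0 ≤ PySem.Int.floordiv j (d : Int) := by
        rw [PySem.Int.floordiv_eq_ediv_of_pos hdpos]
        exact Int.ediv_nonneg hj0 (le_of_lt hdpos)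
      have hiff : PySem.Int.floordiv j (d : Int) = (i : Int)
          ↔ ((i : Int) * d ≤ j ∧ j < ((i : Int) + 1) * d) :=
        PySem.Int.floordiv_eq_iff_of_pos hdpos
      rw [show (i : Int) * d = ((i * d : Nat) : Int) by push_cast; ring,
          show ((i : Int) + 1) * d = (((i + 1) * d : Nat) : Int) by push_cast; ring] at hiff
      constructor
      · intro h
        have hb := hiff.mp (by omega)
        refine ⟨hb.1, ?_⟩
        by_cases hik : i + 1 = K
        · rw [if_pos hik]
          have hEq3 : (i + 1) * d = K * d := by rw [hik]
          omega
        · rw [if_neg hik]; exact hb.2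
      · intro ⟨ha, hb⟩
        have hb' : j < (((i + 1) * d : Nat) : Int) := by
          by_cases hik : i + 1 = K
          · have hEq3 : (i + 1) * d = K * d := by rw [hik]
            omega
          · rw [if_neg hik] at hb; exact hb
        have := hiff.mpr ⟨ha, hb'⟩
        omega
    · rw [if_neg hlt]
      constructor
      · intro h
        have hik : i + 1 = K := by omega
        rw [if_pos hik]
        have hA2 : ((i * d : Nat) : Int) ≤ ((K * d : Nat) : Int) := by
          exact_mod_cast Nat.mul_le_mul_right d (by omega : i ≤ K)
        exact ⟨by omega, hjn⟩
      · intro ⟨ha, hb⟩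
        by_cases hik : i + 1 = K
        · omega
        · rw [if_neg hik] at hb
          omega

-- A's loop, in closed form: k blocks of size d (the i-th slice is d long).
lemma A_split_eq (es : List Int) (K : Nat) (d : Nat) :
    ((PySem.List.pyRange 0 (K : Int) 1).foldl
      (fun acc i => acc ++ [PySem.Set.ofList (PySem.List.slice es (some (i * (d : Int))) (some ((i + 1) * (d : Int))))]) [])
      = (List.range K).map (fun i => PySem.Set.ofList ((es.drop (i * d)).take d)) := by
  rw [PySem.List.pyRange_one]
  simp only [Int.sub_zero, Int.toNat_natCast, List.foldl_map]
  rw [PySem.List.foldl_append_singleton_eq_map]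
  simp only [List.nil_append]
  apply List.map_congr_left
  intro i _
  have h1 : ((0 : Int) + i) * (d : Int) = ((i * d : Nat) : Int) := by push_cast; ring
  have h2 : ((0 : Int) + i + 1) * (d : Int) = ((i * d + d : Nat) : Int) := by push_cast; ring
  rw [h1, h2, PySem.List.slice_natCast]
  have h3 : i * d + d - i * d = d := by omega
  rw [h3]

-- ===== VERDICT (by name: the statement is the Claim_ definition above) =====
theorem sorted_even_k_split_spec : Claim_equal_sorted_even_k_split := by
  intro elements k _ hpre
  unfold Pre_sorted_even_k_split at hpre
  unfold Spec_sorted_even_k_split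
  obtain ⟨K, rfl⟩ : ∃ K : Nat, k = (K : Int) := ⟨k.toNat, by omega⟩
  have hK : 1 ≤ K := by exact_mod_cast hpre
  have hk0 : (K : Int) ≠ 0 := by
    intro h; rw [h] at hpre; omega
  unfold sorted_even_k_split sorted_even_k_split_alt
  simp only [PySem.Int.divmod?, PySem.Int.floordiv?, hk0, if_false]
  generalize PySem.List.sorted elements (fun x => x) false = es
  rw [← Int.ofNat_fdiv, ← Int.ofNat_fmod]
  set d : Nat := es.length / K with hd
  set m : Nat := es.length % K with hm2
  set n : Nat := es.length with hn
  have hdm : K * d + m = n := Nat.div_add_mod n K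
  clear_value d m n
  clear hd hm2
  have hK1 : K = (K - 1) + 1 := by omega
  have h1 : K * d = (K - 1) * d + d := by
    conv_lhs => rw [hK1]
    rw [Nat.succ_mul]
  -- B side: the scatter loop, bucket by bucket
  have hB : (PySem.List.enumerate es).foldl
      (fun bs jx =>
        bs.modify (if jx.1 < (K : Int) * (d : Int) then PySem.Int.floordiv jx.1 (d : Int) else (K : Int) - 1).toNat
          (fun s => PySem.Set.add s jx.2))
      ((PySem.List.pyRange 0 (K : Int) 1).map (fun _ => PySem.Set.empty))
      = (List.range K).map
          (fun i => PySem.Set.ofList ((es.drop (i * d)).take ((if i + 1 = K then n else (i + 1) * d) - i * d))) := by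
    apply List.ext_getElem?
    intro i
    rw [pvScatter_getElem?
        (fun p => (if p.1 < (K : Int) * (d : Int) then PySem.Int.floordiv p.1 (d : Int) else (K : Int) - 1).toNat)
        (PySem.List.enumerate es) _ i]
    rw [List.getElem?_map, List.getElem?_map]
    by_cases hiK : i < K
    · rw [List.getElem?_eq_getElem (l := PySem.List.pyRange 0 (K : Int) 1)
          (by rw [PySem.List.length_pyRange_one]; omega),
        List.getElem?_eq_getElem (l := List.range K) (by simpa using hiK)]
      rw [Option.map_some, Option.map_some, List.getElem_range]
      congr 1
      rw [List.filter_congr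
          (q := fun p => decide (((i * d : Nat) : Int) ≤ p.1 ∧ p.1 < (((if i + 1 = K then n else (i + 1) * d) : Nat) : Int)))]
      · rw [show (0 : Int) = ((0 : Nat) : Int) from rfl, pvFilterEnum]
        simp only [Nat.sub_zero, Nat.max_zero]
        rfl
      · intro p hp
        have hmem : p.1 ∈ (PySem.List.enumerate es).map (fun q => q.1) :=
          List.mem_map_of_mem hp
        rw [PySem.List.map_fst_enumerate] at hmem
        have hbnd := (PySem.List.mem_pyRange_one).mp (by simpa using hmem)
        simp only [decide_eq_decide]
        exact pvIdx_iff K d n hK i hiK (by omega) p.1 hbnd.1 (by simpa [hn] using hbnd.2)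
    · rw [List.getElem?_eq_none (by rw [PySem.List.length_pyRange_one]; omega),
          List.getElem?_eq_none (by simp; omega)]
      rfl
  rw [hB, A_split_eq es K d]
  -- A side: rewrite A's result into the same map
  have hsegL : (es.drop ((K - 1) * d)).take ((if (K - 1) + 1 = K then n else ((K - 1) + 1) * d) - (K - 1) * d)
      = es.drop ((K - 1) * d) := by
    rw [if_pos (by omega)]
    apply List.take_of_length_le
    rw [List.length_drop]
    omega
  have hsplitT : (List.range K).map
      (fun i => PySem.Set.ofList ((es.drop (i * d)).take ((if i + 1 = K then n else (i + 1) * d) - i * d)))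
      = (List.range (K - 1)).map (fun i => PySem.Set.ofList ((es.drop (i * d)).take d))
          ++ [PySem.Set.ofList (es.drop ((K - 1) * d))] := by
    rw [show List.range K = List.range ((K - 1) + 1) by rw [← hK1], List.range_succ,
        List.map_append, List.map_singleton, hsegL]
    congr 1
    apply List.map_congr_left
    intro i hi
    rw [List.mem_range] at hi
    rw [if_neg (by omega), Nat.succ_mul, Nat.add_sub_cancel_left]
  rw [hsplitT]
  have hsplitA : (List.range K).map (fun i => PySem.Set.ofList ((es.drop (i * d)).take d))
      = (List.range (K - 1)).map (fun i => PySem.Set.ofList ((es.drop (i * d)).take d))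
          ++ [PySem.Set.ofList ((es.drop ((K - 1) * d)).take d)] := by
    rw [show List.range K = List.range ((K - 1) + 1) by rw [← hK1], List.range_succ,
        List.map_append, List.map_singleton]
  rw [hsplitA]
  by_cases hm : m = 0
  · rw [if_neg (by simp [hm])]
    rw [List.take_of_length_le (by rw [List.length_drop]; omega : (es.drop ((K - 1) * d)).length ≤ d)]
  · rw [if_pos (by exact_mod_cast hm)]
    rw [if_neg (by simp), List.dropLast_concat, List.getLastD_concat]
    rw [PySem.List.slice_from_neg_natCast es m (Nat.pos_of_ne_zero hm)]
    congr 2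
    have hdd : es.drop (es.length - m) = (es.drop ((K - 1) * d)).drop d := by
      rw [List.drop_drop]
      congr 1
      omega
    rw [hdd, ← PySem.Set.ofList_append, List.take_append_drop]
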